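-- pv_equiv track=rewrite | github.com/NJiHyeon/Algorithm_Study | 프로그래머스/1/133499. 옹알이 （2）/옹알이 （2）.py | solution
-- ===== SOURCE A (Python) =====
-- def solution(babbling):
--     answer = 0
--     baby = ["aya", "ye", "woo", "ma"]
--     new = []
--     for b in babbling : #  "yemawoo"
--         b = b.replace("aya", '1')
--         b = b.replace("ye", '2')
--         b = b.replace("woo", '3')
--         b = b.replace("ma", '4')
--         new.append(b)
--
--     # new = ['12', 'uuu', '22', '243', '11a']
--
--     for bb in new :
--         if bb.isdigit() :
--             if '22' not in bb and '11' not in bb and '33' not in bb and '44' not in bb :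
--                 answer += 1
--
--     return answer
-- ===== SOURCE B (Python) =====
-- def solution(babbling):
--     # Build each word's transcript in a single left-to-right scan: a babbling
--     # sound becomes its marker digit, any other character is kept as is.
--     # A word counts when its transcript is all digits with no marker doubled.
--     sounds = (("aya", "1"), ("ye", "2"), ("woo", "3"), ("ma", "4"))
--     count = 0
--     for word in babbling:
--         out = []
--         i = 0
--         while i < len(word):
--             for sound, mark in sounds:
--                 if word.startswith(sound, i):
--                     out.append(mark)
--                     i += len(sound)
--                     break
--             else:
--                 out.append(word[i])
--                 i += 1
--         s = "".join(out)
--         if s.isdigit() and "11" not in s and "22" not in s and "33" not in s and "44" not in s: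
--             count += 1
--     return count
-- ===== Notes on version B (the rewrite author's own statement) =====
-- stated objective: alternative
-- what changed: A builds each word's digit transcript with four sequential global str.replace passes over the whole word; B builds the transcript in one left-to-right scan (a sound becomes its marker, any other character is kept) and then applies the same validity test, giving a single-pass transcription instead of a cascade of replace passes.
import Mathlib
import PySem

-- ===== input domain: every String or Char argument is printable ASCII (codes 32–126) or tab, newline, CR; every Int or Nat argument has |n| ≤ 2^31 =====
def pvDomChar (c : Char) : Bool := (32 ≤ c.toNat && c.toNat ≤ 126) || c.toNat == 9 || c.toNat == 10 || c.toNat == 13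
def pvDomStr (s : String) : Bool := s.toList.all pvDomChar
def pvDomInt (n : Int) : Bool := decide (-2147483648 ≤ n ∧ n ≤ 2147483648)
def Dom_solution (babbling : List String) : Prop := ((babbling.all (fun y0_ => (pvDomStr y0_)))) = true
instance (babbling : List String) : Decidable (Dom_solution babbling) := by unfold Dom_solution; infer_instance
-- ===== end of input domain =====

-- B replaces A's four global replace passes by ONE left-to-right greedy tokenization per
-- word over the prefix-free sound set; objective: alternative same-cost algorithm.

-- ===== PORT A =====
def solution (babbling : List String) : Int :=
  let answer : Int := 0
  let new : List String := babbling.foldl (fun new b =>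
    let b1 := PySem.Str.replace b "aya" "1"
    let b2 := PySem.Str.replace b1 "ye" "2"
    let b3 := PySem.Str.replace b2 "woo" "3"
    let b4 := PySem.Str.replace b3 "ma" "4"
    new ++ [b4]) []
  new.foldl (fun answer bb =>
    if PySem.Str.strIsdigit bb then
      if !(PySem.Str.isIn "22" bb) && !(PySem.Str.isIn "11" bb)
          && !(PySem.Str.isIn "33" bb) && !(PySem.Str.isIn "44" bb) then
        answer + 1
      else answer
    else answer) answer

-- ===== PORT B =====
-- the while loop of Source B: one transcription step per character position,
-- a sound becomes its marker digit, any other character is kept as is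
def fscan : List Char → List Char
  | [] => []
  | c :: t =>
    if ['a','y','a'].isPrefixOf (c :: t) then '1' :: fscan (t.drop 2)
    else if ['y','e'].isPrefixOf (c :: t) then '2' :: fscan (t.drop 1)
    else if ['w','o','o'].isPrefixOf (c :: t) then '3' :: fscan (t.drop 2)
    else if ['m','a'].isPrefixOf (c :: t) then '4' :: fscan (t.drop 1)
    else c :: fscan t
termination_by l => l.length
decreasing_by all_goals simp

def solution_alt (babbling : List String) : Int :=
  babbling.foldl (fun count w =>
    let s := fscan w.toList
    if PySem.Chars.strIsdigit s && !(PySem.Chars.isIn "11".toList s)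
        && !(PySem.Chars.isIn "22".toList s) && !(PySem.Chars.isIn "33".toList s)
        && !(PySem.Chars.isIn "44".toList s) then count + 1 else count) 0

-- ===== PRECONDITION & SPEC =====
def Spec_solution (babbling : List String) (out : Int) : Prop := out = solution_alt babbling
instance (babbling : List String) (out : Int) : Decidable (Spec_solution babbling out) := by
  unfold Spec_solution; infer_instance

-- ===== CLAIM (what is proved, stated in full; the proofs are below) =====
def Claim_equal_solution : Prop :=
  ∀ (babbling : List String), Dom_solution babbling → Spec_solution babbling (solution babbling)

-- ===== LEMMAS AND PROOFS =====

-- fuel-free form of PySem.Chars.replace (for a nonempty pattern)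
def repl (old new : List Char) : List Char → List Char
  | [] => []
  | c :: t =>
    if old.isPrefixOf (c :: t) then new ++ repl old new (t.drop (old.length - 1))
    else c :: repl old new t
termination_by l => l.length
decreasing_by all_goals simp

theorem repl_nil (old new : List Char) : repl old new [] = [] := by simp [repl]

theorem repl_cons_neg (old new : List Char) (c : Char) (t : List Char)
    (h : ¬ old <+: (c :: t)) : repl old new (c :: t) = c :: repl old new t := by
  rw [repl.eq_def]
  simp [List.isPrefixOf_iff_prefix, h]

theorem repl_append (o : Char) (old' new u : List Char) :
    repl (o :: old') new ((o :: old') ++ u) = new ++ repl (o :: old') new u := by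
  rw [repl.eq_def]
  simp [List.isPrefixOf_iff_prefix, List.prefix_append]

theorem replace_go_eq (old new : List Char) (hold : old ≠ []) :
    ∀ (fuel : Nat) (l acc : List Char), l.length ≤ fuel →
      PySem.Chars.replace.go old new fuel l acc = acc.reverse ++ repl old new l := by
  intro fuel
  induction fuel with
  | zero =>
    intro l acc hl
    have : l = [] := List.eq_nil_of_length_eq_zero (Nat.le_zero.mp hl)
    subst this
    simp [PySem.Chars.replace.go, repl_nil]
  | succ n ih =>
    intro l acc hl
    match l with
    | [] => simp [PySem.Chars.replace.go, repl_nil]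
    | c :: t =>
      rw [PySem.Chars.replace.go]
      by_cases h : old <+: (c :: t)
      · rw [if_pos (List.isPrefixOf_iff_prefix.mpr h)]
        obtain ⟨o, old', rfl⟩ : ∃ o old', old = o :: old' := by
          cases old with
          | nil => exact absurd rfl hold
          | cons o old' => exact ⟨o, old', rfl⟩
        obtain ⟨u, hu⟩ := h
        have hdrop : List.drop (o :: old').length (c :: t) = u := by
          rw [← hu]; exact List.drop_left
        have hulen : u.length ≤ n := by
          have h2 := congrArg List.length hu
          simp at h2 hl
          omega
        rw [hdrop, ih u _ hulen, ← hu, repl_append]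
        simp
      · rw [if_neg (by simp [List.isPrefixOf_iff_prefix, h])]
        rw [ih t (c :: acc) (by simp at hl; omega), repl_cons_neg old new c t h]
        simp

theorem replace_eq_repl (l old new : List Char) (hold : old ≠ []) :
    PySem.Chars.replace l old new = repl old new l := by
  rw [PySem.Chars.replace]
  rw [if_neg (by simp [hold])]
  simpa using replace_go_eq old new hold l.length l [] le_rfl


-- the four replace layers of A's transform, fuel-free
def rA (l : List Char) : List Char := repl ['a','y','a'] ['1'] l
def rY (l : List Char) : List Char := repl ['y','e'] ['2'] l
def rW (l : List Char) : List Char := repl ['w','o','o'] ['3'] l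
def rM (l : List Char) : List Char := repl ['m','a'] ['4'] l
-- the whole transform A applies to one word
def Ftr (l : List Char) : List Char := rM (rW (rY (rA l)))

theorem repl_cons_pos (old new : List Char) (c : Char) (t : List Char) (h : old <+: (c :: t)) :
    repl old new (c :: t) = new ++ repl old new (t.drop (old.length - 1)) := by
  rw [repl.eq_def]
  simp [List.isPrefixOf_iff_prefix, h]

theorem prefix_head {a : Char} {l x : List Char} (h : (a :: l) <+: x) : x.head? = some a := by
  cases x with
  | nil => simp at h
  | cons b y => rw [List.cons_prefix_cons] at h; simp [h.1]

theorem repl_head_singleton (old : List Char) (k : Char) {l : List Char} {d : Char}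
    (h : (repl old [k] l).head? = some d) : d = k ∨ l.head? = some d := by
  cases l with
  | nil => rw [repl_nil] at h; simp at h
  | cons c t =>
    by_cases hp : old <+: (c :: t)
    · rw [repl_cons_pos old [k] c t hp] at h
      simp at h
      exact Or.inl h.symm
    · rw [repl_cons_neg old [k] c t hp] at h
      simp at h
      simp [h]

-- pass lemmas: a head character that cannot start the pattern goes through unchanged
theorem rA_pass (c : Char) (x : List Char) (h : c ≠ 'a') : rA (c :: x) = c :: rA x := by
  unfold rA
  refine repl_cons_neg _ _ _ _ (fun hp => h ?_)
  exact ((List.cons_prefix_cons.mp hp).1).symm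

theorem rY_pass (c : Char) (x : List Char) (h : c ≠ 'y') : rY (c :: x) = c :: rY x := by
  unfold rY
  refine repl_cons_neg _ _ _ _ (fun hp => h ?_)
  exact ((List.cons_prefix_cons.mp hp).1).symm

theorem rW_pass (c : Char) (x : List Char) (h : c ≠ 'w') : rW (c :: x) = c :: rW x := by
  unfold rW
  refine repl_cons_neg _ _ _ _ (fun hp => h ?_)
  exact ((List.cons_prefix_cons.mp hp).1).symm

theorem rM_pass (c : Char) (x : List Char) (h : c ≠ 'm') : rM (c :: x) = c :: rM x := by
  unfold rM
  refine repl_cons_neg _ _ _ _ (fun hp => h ?_)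
  exact ((List.cons_prefix_cons.mp hp).1).symm

theorem rA_pass_a (x : List Char) (h : ¬ ['y','a'] <+: x) : rA ('a' :: x) = 'a' :: rA x := by
  unfold rA
  refine repl_cons_neg _ _ _ _ (fun hp => h ?_)
  exact (List.cons_prefix_cons.mp hp).2

theorem rY_pass_y (x : List Char) (h : x.head? ≠ some 'e') : rY ('y' :: x) = 'y' :: rY x := by
  unfold rY
  refine repl_cons_neg _ _ _ _ (fun hp => h ?_)
  exact prefix_head (List.cons_prefix_cons.mp hp).2

theorem rW_pass_w (x : List Char) (h : x.head? ≠ some 'o') : rW ('w' :: x) = 'w' :: rW x := by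
  unfold rW
  refine repl_cons_neg _ _ _ _ (fun hp => h ?_)
  exact prefix_head (List.cons_prefix_cons.mp hp).2

theorem rW_pass_wo (x : List Char) (h : x.head? ≠ some 'o') :
    rW ('w' :: 'o' :: x) = 'w' :: 'o' :: rW x := by
  have h1 : rW ('w' :: 'o' :: x) = 'w' :: rW ('o' :: x) := by
    unfold rW
    refine repl_cons_neg _ _ _ _ (fun hp => h ?_)
    exact prefix_head (List.cons_prefix_cons.mp (List.cons_prefix_cons.mp hp).2).2
  rw [h1, rW_pass 'o' x (by decide)]

theorem rM_pass_m (x : List Char) (h : x.head? ≠ some 'a') : rM ('m' :: x) = 'm' :: rM x := by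
  unfold rM
  refine repl_cons_neg _ _ _ _ (fun hp => h ?_)
  exact prefix_head (List.cons_prefix_cons.mp hp).2

-- match lemmas: a sound at the head is replaced by its marker
theorem rA_match (u : List Char) : rA ('a' :: 'y' :: 'a' :: u) = '1' :: rA u := by
  unfold rA; exact repl_append 'a' ['y','a'] ['1'] u

theorem rY_match (u : List Char) : rY ('y' :: 'e' :: u) = '2' :: rY u := by
  unfold rY; exact repl_append 'y' ['e'] ['2'] u

theorem rW_match (u : List Char) : rW ('w' :: 'o' :: 'o' :: u) = '3' :: rW u := by
  unfold rW; exact repl_append 'w' ['o','o'] ['3'] u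

theorem rM_match (u : List Char) : rM ('m' :: 'a' :: u) = '4' :: rM u := by
  unfold rM; exact repl_append 'm' ['a'] ['4'] u

-- head tracking through the layers
theorem head_chain1 {t : List Char} {d : Char} (h : (rA t).head? = some d) :
    d = '1' ∨ t.head? = some d := repl_head_singleton _ _ h

theorem head_chain2 {t : List Char} {d : Char} (h : (rY (rA t)).head? = some d) :
    d = '2' ∨ d = '1' ∨ t.head? = some d := by
  rcases repl_head_singleton _ _ h with h1 | h1
  · exact Or.inl h1
  · exact Or.inr (head_chain1 h1)

theorem head_chain3 {t : List Char} {d : Char} (h : (rW (rY (rA t))).head? = some d) :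
    d = '3' ∨ d = '2' ∨ d = '1' ∨ t.head? = some d := by
  rcases repl_head_singleton _ _ h with h1 | h1
  · exact Or.inl h1
  · exact Or.inr (head_chain2 h1)

-- step lemmas for the whole transform
theorem step_aya (u : List Char) : Ftr ('a' :: 'y' :: 'a' :: u) = '1' :: Ftr u := by
  unfold Ftr
  rw [rA_match, rY_pass _ _ (by decide), rW_pass _ _ (by decide), rM_pass _ _ (by decide)]

theorem step_ye (u : List Char) : Ftr ('y' :: 'e' :: u) = '2' :: Ftr u := by
  unfold Ftr
  rw [rA_pass _ _ (by decide), rA_pass _ _ (by decide), rY_match,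
      rW_pass _ _ (by decide), rM_pass _ _ (by decide)]

theorem step_woo (u : List Char) : Ftr ('w' :: 'o' :: 'o' :: u) = '3' :: Ftr u := by
  unfold Ftr
  rw [rA_pass _ _ (by decide), rA_pass _ _ (by decide), rA_pass _ _ (by decide),
      rY_pass _ _ (by decide), rY_pass _ _ (by decide), rY_pass _ _ (by decide),
      rW_match, rM_pass _ _ (by decide)]

theorem step_ma (u : List Char) (h : ¬ ['y','a'] <+: u) : Ftr ('m' :: 'a' :: u) = '4' :: Ftr u := by
  unfold Ftr
  rw [rA_pass _ _ (by decide), rA_pass_a u h,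
      rY_pass _ _ (by decide), rY_pass _ _ (by decide),
      rW_pass _ _ (by decide), rW_pass _ _ (by decide), rM_match]

theorem step_ma_ya (v : List Char) : Ftr ('m' :: 'a' :: 'y' :: 'a' :: v) = 'm' :: '1' :: Ftr v := by
  unfold Ftr
  rw [rA_pass _ _ (by decide), rA_match,
      rY_pass _ _ (by decide), rY_pass _ _ (by decide),
      rW_pass _ _ (by decide), rW_pass _ _ (by decide),
      rM_pass_m _ (by simp), rM_pass _ _ (by decide)]

theorem stepc_generic (c : Char) (t : List Char)
    (h1 : c ≠ 'a') (h2 : c ≠ 'y') (h3 : c ≠ 'w') (h4 : c ≠ 'm') :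
    Ftr (c :: t) = c :: Ftr t := by
  unfold Ftr
  rw [rA_pass _ _ h1, rY_pass _ _ h2, rW_pass _ _ h3, rM_pass _ _ h4]

theorem stepc_a (t : List Char) (h : ¬ ['y','a'] <+: t) : Ftr ('a' :: t) = 'a' :: Ftr t := by
  unfold Ftr
  rw [rA_pass_a t h, rY_pass _ _ (by decide), rW_pass _ _ (by decide), rM_pass _ _ (by decide)]

theorem stepc_y (t : List Char) (h : t.head? ≠ some 'e') : Ftr ('y' :: t) = 'y' :: Ftr t := by
  unfold Ftr
  rw [rA_pass _ _ (by decide)]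
  rw [rY_pass_y _ (by
    intro heq
    rcases head_chain1 heq with h1 | h1
    · exact absurd h1 (by decide)
    · exact h h1)]
  rw [rW_pass _ _ (by decide), rM_pass _ _ (by decide)]

theorem stepc_w (t : List Char) (h : t.head? ≠ some 'o') : Ftr ('w' :: t) = 'w' :: Ftr t := by
  unfold Ftr
  rw [rA_pass _ _ (by decide), rY_pass _ _ (by decide)]
  rw [rW_pass_w _ (by
    intro heq
    rcases head_chain2 heq with h1 | h1 | h1
    · exact absurd h1 (by decide)
    · exact absurd h1 (by decide)
    · exact h h1)]
  rw [rM_pass _ _ (by decide)]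

theorem stepc_wo (t2 : List Char) (h : t2.head? ≠ some 'o') :
    Ftr ('w' :: 'o' :: t2) = 'w' :: 'o' :: Ftr t2 := by
  unfold Ftr
  rw [rA_pass _ _ (by decide), rA_pass _ _ (by decide),
      rY_pass _ _ (by decide), rY_pass _ _ (by decide)]
  rw [rW_pass_wo _ (by
    intro heq
    rcases head_chain2 heq with h1 | h1 | h1
    · exact absurd h1 (by decide)
    · exact absurd h1 (by decide)
    · exact h h1)]
  rw [rM_pass _ _ (by decide), rM_pass _ _ (by decide)]

theorem stepc_m (t : List Char) (h : t.head? ≠ some 'a') : Ftr ('m' :: t) = 'm' :: Ftr t := by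
  unfold Ftr
  rw [rA_pass _ _ (by decide), rY_pass _ _ (by decide), rW_pass _ _ (by decide)]
  rw [rM_pass_m _ (by
    intro heq
    rcases head_chain3 heq with h1 | h1 | h1 | h1
    · exact absurd h1 (by decide)
    · exact absurd h1 (by decide)
    · exact absurd h1 (by decide)
    · exact h h1)]

theorem Ftr_nil : Ftr [] = [] := by
  simp [Ftr, rA, rY, rW, rM, repl_nil]

-- A's per-word transform, at the String level
def transform (w : String) : String :=
  PySem.Str.replace (PySem.Str.replace (PySem.Str.replace (PySem.Str.replace w "aya" "1") "ye" "2") "woo" "3") "ma" "4"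

theorem transform_toList (w : String) : (transform w).toList = Ftr w.toList := by
  unfold transform Ftr rA rY rW rM
  rw [PySem.Str.toList_replace, PySem.Str.toList_replace, PySem.Str.toList_replace,
      PySem.Str.toList_replace]
  rw [replace_eq_repl _ _ _ (by decide), replace_eq_repl _ _ _ (by decide),
      replace_eq_repl _ _ _ (by decide), replace_eq_repl _ _ _ (by decide)]
  rfl

-- a list with a non-digit member fails the all-digits test
theorem all_isdigit_false {l : List Char} {c : Char} (hm : c ∈ l)
    (hc : PySem.Chars.isdigit c = false) : l.all PySem.Chars.isdigit = false := by
  rw [← Bool.not_eq_true, List.all_eq_true]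
  intro hall
  rw [hall c hm] at hc
  simp at hc

-- the scan agrees with A's transform whenever either transcript is all digits:
-- on each word, either the two transcripts are equal and all digits,
-- or both contain a non-digit character
theorem main_fscan : ∀ (s : List Char),
    (fscan s = Ftr s ∧ (fscan s).all PySem.Chars.isdigit = true) ∨
    ((fscan s).all PySem.Chars.isdigit = false ∧ (Ftr s).all PySem.Chars.isdigit = false) := by
  have key : ∀ (n : Nat) (s : List Char), s.length ≤ n →
      (fscan s = Ftr s ∧ (fscan s).all PySem.Chars.isdigit = true) ∨
      ((fscan s).all PySem.Chars.isdigit = false ∧ (Ftr s).all PySem.Chars.isdigit = false) := by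
    intro n
    induction n with
    | zero =>
      intro s hs
      have hnil : s = [] := List.eq_nil_of_length_eq_zero (Nat.le_zero.mp hs)
      subst hnil
      exact Or.inl ⟨by simp [fscan, Ftr_nil], by simp [fscan]⟩
    | succ n ih =>
      intro s hs
      cases s with
      | nil => exact Or.inl ⟨by simp [fscan, Ftr_nil], by simp [fscan]⟩
      | cons c t =>
        rw [fscan.eq_def]
        simp only [List.isPrefixOf_iff_prefix]
        split_ifs with h1 h2 h3 h4
        -- aya
        · obtain ⟨u, hu⟩ := h1
          obtain ⟨rfl, rfl⟩ : c = 'a' ∧ t = 'y' :: 'a' :: u := by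
            simp only [List.cons_append, List.nil_append] at hu
            exact ⟨((List.cons.injEq _ _ _ _).mp hu).1.symm, ((List.cons.injEq _ _ _ _).mp hu).2.symm⟩
          have hlen : u.length ≤ n := by simp at hs; omega
          have hdrop : (('y' :: 'a' :: u).drop 2) = u := rfl
          rw [hdrop, step_aya]
          rcases ih u hlen with ⟨hF, hall⟩ | ⟨ha1, ha2⟩
          · exact Or.inl ⟨by rw [hF], by simp [hall]; decide⟩
          · exact Or.inr ⟨by simp [ha1], by simp [ha2]⟩
        -- ye
        · obtain ⟨u, hu⟩ := h2
          obtain ⟨rfl, rfl⟩ : c = 'y' ∧ t = 'e' :: u := by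
            simp only [List.cons_append, List.nil_append] at hu
            exact ⟨((List.cons.injEq _ _ _ _).mp hu).1.symm, ((List.cons.injEq _ _ _ _).mp hu).2.symm⟩
          have hlen : u.length ≤ n := by simp at hs; omega
          have hdrop : (('e' :: u).drop 1) = u := rfl
          rw [hdrop, step_ye]
          rcases ih u hlen with ⟨hF, hall⟩ | ⟨ha1, ha2⟩
          · exact Or.inl ⟨by rw [hF], by simp [hall]; decide⟩
          · exact Or.inr ⟨by simp [ha1], by simp [ha2]⟩
        -- woo
        · obtain ⟨u, hu⟩ := h3
          obtain ⟨rfl, rfl⟩ : c = 'w' ∧ t = 'o' :: 'o' :: u := by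
            simp only [List.cons_append, List.nil_append] at hu
            exact ⟨((List.cons.injEq _ _ _ _).mp hu).1.symm, ((List.cons.injEq _ _ _ _).mp hu).2.symm⟩
          have hlen : u.length ≤ n := by simp at hs; omega
          have hdrop : (('o' :: 'o' :: u).drop 2) = u := rfl
          rw [hdrop, step_woo]
          rcases ih u hlen with ⟨hF, hall⟩ | ⟨ha1, ha2⟩
          · exact Or.inl ⟨by rw [hF], by simp [hall]; decide⟩
          · exact Or.inr ⟨by simp [ha1], by simp [ha2]⟩
        -- ma
        · obtain ⟨u, hu⟩ := h4
          obtain ⟨rfl, rfl⟩ : c = 'm' ∧ t = 'a' :: u := by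
            simp only [List.cons_append, List.nil_append] at hu
            exact ⟨((List.cons.injEq _ _ _ _).mp hu).1.symm, ((List.cons.injEq _ _ _ _).mp hu).2.symm⟩
          have hlen : u.length ≤ n := by simp at hs; omega
          have hdrop : (('a' :: u).drop 1) = u := rfl
          rw [hdrop]
          by_cases hya : ['y','a'] <+: u
          · obtain ⟨v, hv⟩ := hya
            obtain rfl : u = 'y' :: 'a' :: v := hv.symm
            refine Or.inr ⟨?_, ?_⟩
            · have hy : fscan ('y' :: 'a' :: v) = 'y' :: fscan ('a' :: v) := by
                rw [fscan.eq_def]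
                simp [List.isPrefixOf_iff_prefix, List.cons_prefix_cons]
              rw [hy]
              exact all_isdigit_false (c := 'y') (by simp) (by decide)
            · rw [step_ma_ya]
              exact all_isdigit_false List.mem_cons_self (by decide)
          · rw [step_ma u hya]
            rcases ih u hlen with ⟨hF, hall⟩ | ⟨ha1, ha2⟩
            · exact Or.inl ⟨by rw [hF], by simp [hall]; decide⟩
            · exact Or.inr ⟨by simp [ha1], by simp [ha2]⟩
        -- no sound starts here: the character is kept
        · by_cases hcd : PySem.Chars.isdigit c = true
          · -- a kept digit character: both transforms keep it and continue
            have hne : c ≠ 'a' ∧ c ≠ 'y' ∧ c ≠ 'w' ∧ c ≠ 'm' := by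
              simp [PySem.Chars.isdigit] at hcd
              refine ⟨?_, ?_, ?_, ?_⟩ <;> (rintro rfl; revert hcd; decide)
            have hlen : t.length ≤ n := by simp at hs; omega
            rw [stepc_generic c t hne.1 hne.2.1 hne.2.2.1 hne.2.2.2]
            rcases ih t hlen with ⟨hF, hall⟩ | ⟨ha1, ha2⟩
            · exact Or.inl ⟨by rw [hF], by simp [hall, hcd]⟩
            · exact Or.inr ⟨by simp [ha1], by simp [ha2]⟩
          · -- a kept non-digit character: both transcripts fail the all-digits test
            have hcd' : PySem.Chars.isdigit c = false := by
              cases h : PySem.Chars.isdigit c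
              · rfl
              · exact absurd h hcd
            refine Or.inr ⟨all_isdigit_false (List.mem_cons_self) hcd', ?_⟩
            by_cases ha : c = 'a'
            · subst ha
              have hstep : Ftr ('a' :: t) = 'a' :: Ftr t :=
                stepc_a t (fun hp => h1 (by
                  obtain ⟨v, hv⟩ := hp
                  exact ⟨v, by rw [← hv]; rfl⟩))
              rw [hstep]
              exact all_isdigit_false List.mem_cons_self (by decide)
            · by_cases hy : c = 'y'
              · subst hy
                have hne : t.head? ≠ some 'e' := by
                  intro he
                  cases t with
                  | nil => simp at he
                  | cons b y =>
                    simp at he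
                    subst he
                    exact h2 ⟨y, rfl⟩
                rw [stepc_y t hne]
                exact all_isdigit_false List.mem_cons_self (by decide)
              · by_cases hw : c = 'w'
                · subst hw
                  by_cases ho : t.head? = some 'o'
                  · cases t with
                    | nil => simp at ho
                    | cons b y =>
                      simp at ho
                      subst ho
                      have hne : y.head? ≠ some 'o' := by
                        intro he
                        cases y with
                        | nil => simp at he
                        | cons b2 z =>
                          simp at he
                          subst he
                          exact h3 ⟨z, rfl⟩
                      rw [stepc_wo y hne]
                      exact all_isdigit_false List.mem_cons_self (by decide)
                  · rw [stepc_w t ho]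
                    exact all_isdigit_false List.mem_cons_self (by decide)
                · by_cases hm : c = 'm'
                  · subst hm
                    have hne : t.head? ≠ some 'a' := by
                      intro he
                      cases t with
                      | nil => simp at he
                      | cons b y =>
                        simp at he
                        subst he
                        exact h4 ⟨y, rfl⟩
                    rw [stepc_m t hne]
                    exact all_isdigit_false List.mem_cons_self (by decide)
                  · rw [stepc_generic c t ha hy hw hm]
                    exact all_isdigit_false List.mem_cons_self hcd'
  intro s
  exact key s.length s le_rfl

-- A tests the four double markers nested after isdigit, B tests them in one conjunction
theorem cond_shuffle (a b c d e : Bool) (x : Int) :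
    (if a then (if !c && !b && !d && !e then x + 1 else x) else x)
    = (if a && !b && !c && !d && !e then x + 1 else x) := by
  cases a <;> cases b <;> cases c <;> cases d <;> cases e <;> simp

-- the two per-word fold steps agree
theorem word_step (x : Int) (w : String) :
    (if PySem.Str.strIsdigit (transform w) then
       if !(PySem.Str.isIn "22" (transform w)) && !(PySem.Str.isIn "11" (transform w))
           && !(PySem.Str.isIn "33" (transform w)) && !(PySem.Str.isIn "44" (transform w)) then
         x + 1
       else x
     else x)
    = (let s := fscan w.toList
       if PySem.Chars.strIsdigit s && !(PySem.Chars.isIn "11".toList s)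
           && !(PySem.Chars.isIn "22".toList s) && !(PySem.Chars.isIn "33".toList s)
           && !(PySem.Chars.isIn "44".toList s) then x + 1 else x) := by
  rw [PySem.Str.strIsdigit_eq, PySem.Str.isIn_eq, PySem.Str.isIn_eq, PySem.Str.isIn_eq,
      PySem.Str.isIn_eq, transform_toList]
  rcases main_fscan w.toList with ⟨hF, _⟩ | ⟨ha1, ha2⟩
  · rw [hF]
    exact cond_shuffle _ _ _ _ _ x
  · have hA : PySem.Chars.strIsdigit (Ftr w.toList) = false := by
      unfold PySem.Chars.strIsdigit
      rw [ha2, Bool.and_false]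
    have hB : PySem.Chars.strIsdigit (fscan w.toList) = false := by
      unfold PySem.Chars.strIsdigit
      rw [ha1, Bool.and_false]
    simp [hA, hB]


-- ===== VERDICT (by name: the statement is the Claim_ definition above) =====
theorem solution_spec : Claim_equal_solution := by
  intro babbling _
  unfold Spec_solution solution solution_alt
  simp only []
  rw [show (fun (new : List String) (b : String) => new ++
        [PySem.Str.replace (PySem.Str.replace (PySem.Str.replace (PySem.Str.replace b "aya" "1") "ye" "2") "woo" "3") "ma" "4"])
      = (fun acc b => acc ++ [transform b]) from rfl]
  rw [PySem.List.foldl_append_singleton_eq_map transform babbling []]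
  rw [List.nil_append, List.foldl_map]
  refine congrFun (congrFun (congrArg _ ?_) 0) babbling
  funext x w
  exact word_step x w
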